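-- pv_equiv track=rewrite | github.com/vipinagrawal25/FlexibleFilament | MC2d/FuncMC2d.py | triangles
-- ===== SOURCE A (Python) =====
-- def triangles(n, point):
--     triplets=[]
--     i=0
--     j=1
--     for nr in range(1,n+1):
--         for k in range(nr):
--             triplets.append([point[i], point[j], point[j+1]])
--             i+=1
--             j+=1
--         j+=1
--     return triplets
-- ===== SOURCE B (Python) =====
-- def triangles(n, point):
--     # Slice-and-zip reformulation: row nr pairs the slice of row-nr points with
--     # the slice of row-(nr+1) points (and its shift by one) instead of walking
--     # element indices one by one.
--     out = []
--     base = 0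
--     for nr in range(1, n + 1):
--         lower = point[base:base + nr]
--         upper = point[base + nr:base + 2 * nr + 1]
--         out.extend([a, b, c] for a, b, c in zip(lower, upper, upper[1:]))
--         base += nr
--     return out
-- ===== Notes on version B (the rewrite author's own statement) =====
-- stated objective: alternative
-- what changed: Replaces the element-by-element index walk (counters i, j, one append per triplet) by per-row list slices zipped together: each row's triplets come from zip(lower, upper, upper[1:]) of two contiguous slices, so no per-element index bookkeeping remains.
import Mathlib
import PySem

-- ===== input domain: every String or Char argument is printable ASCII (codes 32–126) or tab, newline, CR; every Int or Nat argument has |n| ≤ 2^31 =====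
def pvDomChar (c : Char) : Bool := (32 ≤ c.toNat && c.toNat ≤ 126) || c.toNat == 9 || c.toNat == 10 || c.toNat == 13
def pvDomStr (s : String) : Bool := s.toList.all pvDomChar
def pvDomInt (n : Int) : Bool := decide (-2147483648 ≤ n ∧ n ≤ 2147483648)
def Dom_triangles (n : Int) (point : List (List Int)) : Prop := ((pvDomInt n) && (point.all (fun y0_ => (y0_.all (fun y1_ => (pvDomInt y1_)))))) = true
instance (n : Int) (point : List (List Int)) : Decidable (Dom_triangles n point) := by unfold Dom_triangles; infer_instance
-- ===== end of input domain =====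

-- B replaces A's element-by-element index walk (counters i, j) by per-row list
-- slices zipped together (zip(lower, upper, upper[1:])); same triplets, same order
-- (objective: alternative).

-- ===== PORT A =====
def triangles (n : Int) (point : List (List Int)) : List (List (List Int)) :=
  ((PySem.List.pyRange 1 (n + 1) 1).foldl
    (fun (st : List (List (List Int)) × Int × Int) nr =>
      let st2 := (PySem.List.pyRange 0 nr 1).foldl
        (fun (s : List (List (List Int)) × Int × Int) _k =>
          (s.1 ++ [[PySem.List.pyGetD point s.2.1 [],
                    PySem.List.pyGetD point s.2.2 [],
                    PySem.List.pyGetD point (s.2.2 + 1) []]],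
           s.2.1 + 1, s.2.2 + 1)) st
      (st2.1, st2.2.1, st2.2.2 + 1))
    ([], 0, 1)).1

-- ===== PORT B =====
def triangles_alt (n : Int) (point : List (List Int)) : List (List (List Int)) :=
  ((PySem.List.pyRange 1 (n + 1) 1).foldl
    (fun (st : List (List (List Int)) × Int) nr =>
      let lower := PySem.List.slice point (some st.2) (some (st.2 + nr))
      let upper := PySem.List.slice point (some (st.2 + nr)) (some (st.2 + 2 * nr + 1))
      (st.1 ++ (lower.zip (upper.zip (PySem.List.slice upper (some 1) none))).map
          (fun t => [t.1, t.2.1, t.2.2]),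
       st.2 + nr))
    ([], 0)).1

-- ===== PRECONDITION & SPEC =====
-- Pre_ excludes exactly the inputs where Python A raises IndexError
-- (n ≥ 1 and point shorter than one past the largest index accessed, T(n)+n).
def Pre_triangles (n : Int) (point : List (List Int)) : Prop :=
  n < 1 ∨ n * (n + 1) / 2 + n + 1 ≤ (point.length : Int)
instance (n : Int) (point : List (List Int)) : Decidable (Pre_triangles n point) := by
  unfold Pre_triangles; infer_instance
def pvWitness_triangles : Int × List (List Int) :=
  (2, [[0], [1], [2], [3], [4], [5]])
def Spec_triangles (n : Int) (point : List (List Int)) (out : List (List (List Int))) : Prop := out = triangles_alt n point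
instance (n : Int) (point : List (List Int)) (out : List (List (List Int))) : Decidable (Spec_triangles n point out) := by unfold Spec_triangles; infer_instance

-- ===== CLAIM (what is proved, stated in full; the proofs are below) =====
def Claim_equal_triangles : Prop := ∀ (n : Int) (point : List (List Int)), Dom_triangles n point → Pre_triangles n point → Spec_triangles n point (triangles n point)

-- ===== LEMMAS AND PROOFS =====

-- the inner body of A's row loop (the point list is fixed throughout)
def pvStepA (point : List (List Int)) (s : List (List (List Int)) × Int × Int) (_k : Int) :
    List (List (List Int)) × Int × Int :=
  (s.1 ++ [[PySem.List.pyGetD point s.2.1 [],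
            PySem.List.pyGetD point s.2.2 [],
            PySem.List.pyGetD point (s.2.2 + 1) []]],
   s.2.1 + 1, s.2.2 + 1)

-- B's loop body, row of slices zipped
def pvUpper (point : List (List Int)) (base nr : Int) : List (List Int) :=
  PySem.List.slice point (some (base + nr)) (some (base + 2 * nr + 1))

def pvZipRow (point : List (List Int)) (base nr : Int) : List (List (List Int)) :=
  ((PySem.List.slice point (some base) (some (base + nr))).zip
      ((pvUpper point base nr).zip (PySem.List.slice (pvUpper point base nr) (some 1) none))).map
    (fun t => [t.1, t.2.1, t.2.2])

def pvStepB (point : List (List Int)) (st : List (List (List Int)) × Int) (nr : Int) :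
    List (List (List Int)) × Int :=
  (st.1 ++ pvZipRow point st.2 nr, st.2 + nr)

-- closed-form row nr (indices from triangular numbers), common comparison point
def pvRow (point : List (List Int)) (nr : Int) : List (List (List Int)) :=
  (PySem.List.pyRange 0 nr 1).map (fun k =>
    [PySem.List.pyGetD point ((nr - 1) * nr / 2 + k) [],
     PySem.List.pyGetD point (nr * (nr + 1) / 2 + k) [],
     PySem.List.pyGetD point (nr * (nr + 1) / 2 + k + 1) []])

-- A's inner loop ignores k and just walks i, j upward; its effect in closed form.
lemma inner_fold (point : List (List Int)) (l : List Int)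
    (acc : List (List (List Int))) (i j : Int) :
    l.foldl (pvStepA point) (acc, i, j) =
      (acc ++ (List.range l.length).map (fun k : Nat =>
          [PySem.List.pyGetD point (i + (k : Int)) [],
           PySem.List.pyGetD point (j + (k : Int)) [],
           PySem.List.pyGetD point (j + (k : Int) + 1) []]),
       i + l.length, j + l.length) := by
  induction l generalizing acc i j with
  | nil => simp
  | cons x t ih =>
      simp only [List.foldl_cons, List.length_cons]
      rw [show pvStepA point (acc, i, j) x =
        (acc ++ [[PySem.List.pyGetD point i [],
                  PySem.List.pyGetD point j [],
                  PySem.List.pyGetD point (j + 1) []]], i + 1, j + 1) from rfl]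
      rw [ih]
      refine Prod.ext ?_ (Prod.ext (by push_cast; ring) (by push_cast; ring))
      simp only [List.range_succ_eq_map, List.map_cons, List.map_map, List.append_assoc,
        List.cons_append, List.nil_append, Function.comp_def]
      congr 2
      · push_cast; ring_nf
      · refine List.map_congr_left (fun a _ => ?_)
        push_cast; ring_nf

lemma tri_succ (m : Int) : m * (m + 1) / 2 + (m + 1) = (m + 1) * (m + 2) / 2 := by
  obtain ⟨t, ht⟩ := Int.even_mul_succ_self m
  have h1 : m * (m + 1) = 2 * t := by omega
  have h2 : (m + 1) * (m + 2) = 2 * (t + m + 1) := by nlinarith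
  rw [h1, h2, Int.mul_ediv_cancel_left _ (by norm_num), Int.mul_ediv_cancel_left _ (by norm_num)]
  ring

-- the state invariant for A: after rows 1..m the accumulator is the closed-form rows,
-- i = T(m), j = T(m+1)
lemma outer_fold_A (point : List (List Int)) (m : Nat) :
    (PySem.List.pyRange 1 ((m : Int) + 1) 1).foldl
      (fun (st : List (List (List Int)) × Int × Int) nr =>
        let st2 := (PySem.List.pyRange 0 nr 1).foldl (pvStepA point) st
        (st2.1, st2.2.1, st2.2.2 + 1)) ([], 0, 1) =
    ((PySem.List.pyRange 1 ((m : Int) + 1) 1).flatMap (pvRow point),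
     (m : Int) * (m + 1) / 2, ((m : Int) + 1) * (m + 2) / 2) := by
  induction m with
  | zero => simp [PySem.List.pyRange_one_eq_nil]
  | succ p ih =>
      have hsplit : PySem.List.pyRange 1 ((p : Int) + 1 + 1) 1 =
          PySem.List.pyRange 1 ((p : Int) + 1) 1 ++ [(p : Int) + 1] :=
        PySem.List.pyRange_one_succ_right (by omega)
      push_cast
      rw [hsplit, List.foldl_append, List.flatMap_append, ih]
      simp only [List.foldl_cons, List.foldl_nil]
      rw [inner_fold]
      have hlen : (PySem.List.pyRange 0 ((p : Int) + 1) 1).length = p + 1 := by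
        rw [PySem.List.length_pyRange_one]; omega
      refine Prod.ext ?_ (Prod.ext ?_ ?_)
      · -- accumulator component
        simp only [List.flatMap_cons, List.flatMap_nil, List.append_nil]
        congr 1
        rw [pvRow, hlen]
        have hrange : PySem.List.pyRange 0 ((p : Int) + 1) 1 =
            (List.range (p + 1)).map (fun k : Nat => (k : Int)) := by
          rw [PySem.List.pyRange_one]
          simp
        rw [hrange, List.map_map]
        apply List.map_congr_left
        intro k _
        simp only [Function.comp]
        have e1 : ((p : Int) + 1 - 1) * ((p : Int) + 1) = (p : Int) * ((p : Int) + 1) := by ring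
        have e2 : ((p : Int) + 1) * ((p : Int) + 1 + 1) = ((p : Int) + 1) * ((p : Int) + 2) := by ring
        rw [e1, e2]
      · -- i component
        rw [hlen]
        have h := tri_succ (p : Int)
        push_cast
        ring_nf at h ⊢
        linarith [h]
      · -- j component
        rw [hlen]
        have h := tri_succ ((p : Int) + 1)
        push_cast
        ring_nf at h ⊢
        linarith [h]

-- the state invariant for B: after rows 1..m the accumulator is the slice-zip rows
-- with base = T(nr-1), and base = T(m)
lemma outer_fold_B (point : List (List Int)) (m : Nat) :
    (PySem.List.pyRange 1 ((m : Int) + 1) 1).foldl (pvStepB point) ([], 0) =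
    ((PySem.List.pyRange 1 ((m : Int) + 1) 1).flatMap
        (fun nr => pvZipRow point ((nr - 1) * nr / 2) nr),
     (m : Int) * (m + 1) / 2) := by
  induction m with
  | zero => simp [PySem.List.pyRange_one_eq_nil]
  | succ p ih =>
      have hsplit : PySem.List.pyRange 1 ((p : Int) + 1 + 1) 1 =
          PySem.List.pyRange 1 ((p : Int) + 1) 1 ++ [(p : Int) + 1] :=
        PySem.List.pyRange_one_succ_right (by omega)
      push_cast
      rw [hsplit, List.foldl_append, List.flatMap_append, ih]
      simp only [List.foldl_cons, List.foldl_nil, List.flatMap_cons, List.flatMap_nil,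
        List.append_nil]
      unfold pvStepB
      refine Prod.ext ?_ ?_ <;> dsimp only
      · congr 2
        have e1 : ((p : Int) + 1 - 1) * ((p : Int) + 1) = (p : Int) * ((p : Int) + 1) := by ring
        rw [e1]
      · show (p : Int) * ((p : Int) + 1) / 2 + ((p : Int) + 1)
          = ((p : Int) + 1) * ((p : Int) + 1 + 1) / 2
        rw [tri_succ]
        congr 1

-- (xs.drop b).take r listed element by element
lemma dropTake_eq_map_range {α : Type} (d : α) (xs : List α) (b r : Nat)
    (h : b + r ≤ xs.length) :
    (xs.drop b).take r = (List.range r).map (fun k => xs.getD (b + k) d) := by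
  apply List.ext_getElem
  · simp; omega
  · intro i h1 h2
    have hi : i < r := by simpa using h2
    have hbi : b + i < xs.length := by omega
    simp [List.getElem_take, List.getElem_drop, List.getD_eq_getElem?_getD,
      List.getElem?_eq_getElem hbi]

-- the slice-zip row equals the closed indexed row when point is long enough
lemma zipRow_eq_indexed (point : List (List Int)) (b r : Nat)
    (h : b + 2 * r + 1 ≤ point.length) :
    pvZipRow point (b : Int) (r : Int) =
      (List.range r).map (fun k : Nat =>
        [PySem.List.pyGetD point ((b : Int) + (k : Int)) [],
         PySem.List.pyGetD point ((b : Int) + (r : Int) + (k : Int)) [],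
         PySem.List.pyGetD point ((b : Int) + (r : Int) + (k : Int) + 1) []]) := by
  unfold pvZipRow pvUpper
  have hl : PySem.List.slice point (some (b : Int)) (some ((b : Int) + (r : Int))) =
      (point.drop b).take r := by
    have : ((b : Int) + (r : Int)) = ((b + r : Nat) : Int) := by push_cast; ring
    rw [this, PySem.List.slice_natCast]
    congr 1; omega
  have hu : PySem.List.slice point (some ((b : Int) + (r : Int)))
      (some ((b : Int) + 2 * (r : Int) + 1)) = (point.drop (b + r)).take (r + 1) := by
    have e1 : ((b : Int) + (r : Int)) = ((b + r : Nat) : Int) := by push_cast; ring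
    have e2 : ((b : Int) + 2 * (r : Int) + 1) = ((b + 2 * r + 1 : Nat) : Int) := by
      push_cast; ring
    rw [e1, e2, PySem.List.slice_natCast]
    congr 1; omega
  rw [hl, hu, PySem.List.slice_from_one]
  rw [dropTake_eq_map_range ([] : List Int) point b r (by omega),
      dropTake_eq_map_range ([] : List Int) point (b + r) (r + 1) (by omega)]
  apply List.ext_getElem
  · simp
  · intro i h1 h2
    have hir : i < r := by simpa using h2
    simp only [List.getElem_map, List.getElem_zip, List.getElem_tail, List.getElem_range]
    have g1 : PySem.List.pyGetD point ((b : Int) + (i : Int)) [] = point.getD (b + i) [] := by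
      rw [show ((b : Int) + (i : Int)) = ((b + i : Nat) : Int) by push_cast; ring,
        PySem.List.pyGetD_natCast]
    have g2 : PySem.List.pyGetD point ((b : Int) + (r : Int) + (i : Int)) []
        = point.getD (b + r + i) [] := by
      rw [show ((b : Int) + (r : Int) + (i : Int)) = ((b + r + i : Nat) : Int) by
          push_cast; ring,
        PySem.List.pyGetD_natCast]
    have g3 : PySem.List.pyGetD point ((b : Int) + (r : Int) + (i : Int) + 1) []
        = point.getD (b + r + (i + 1)) [] := by
      rw [show ((b : Int) + (r : Int) + (i : Int) + 1) = ((b + r + (i + 1) : Nat) : Int) by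
          push_cast; ring,
        PySem.List.pyGetD_natCast]
    rw [g1, g2, g3]

-- under Pre_, B's slice-zip row for any nr in 1..n is A's closed-form row
lemma row_eq (point : List (List Int)) (n nr : Int)
    (hpre : n * (n + 1) / 2 + n + 1 ≤ (point.length : Int))
    (h1 : 1 ≤ nr) (h2 : nr ≤ n) :
    pvZipRow point ((nr - 1) * nr / 2) nr = pvRow point nr := by
  obtain ⟨r, hr⟩ : ∃ r : Nat, nr = (r : Int) + 1 := ⟨(nr - 1).toNat, by omega⟩
  subst hr
  obtain ⟨t, ht⟩ : ∃ t : Nat, r * (r + 1) = 2 * t := (Nat.even_mul_succ_self r).exists_two_nsmul _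
  have htZ : (r : Int) * ((r : Int) + 1) = 2 * (t : Int) := by exact_mod_cast ht
  have hbase : ((r : Int) + 1 - 1) * ((r : Int) + 1) / 2 = (t : Int) := by
    have e : ((r : Int) + 1 - 1) * ((r : Int) + 1) = 2 * (t : Int) := by linear_combination htZ
    rw [e, Int.mul_ediv_cancel_left _ (by norm_num)]
  have hT : ((r : Int) + 1) * ((r : Int) + 1 + 1) / 2 = (t : Int) + (r : Int) + 1 := by
    have e : ((r : Int) + 1) * ((r : Int) + 1 + 1) = 2 * ((t : Int) + (r : Int) + 1) := by
      linear_combination htZ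
    rw [e, Int.mul_ediv_cancel_left _ (by norm_num)]
  -- length bound: t + 2(r+1) + 1 ≤ point.length
  obtain ⟨m, hm⟩ : ∃ m : Nat, n = (m : Int) := ⟨n.toNat, by omega⟩
  subst hm
  obtain ⟨s, hs⟩ : ∃ s : Nat, m * (m + 1) = 2 * s := (Nat.even_mul_succ_self m).exists_two_nsmul _
  have hsZ : (m : Int) * ((m : Int) + 1) = 2 * (s : Int) := by exact_mod_cast hs
  have hsdiv : (m : Int) * ((m : Int) + 1) / 2 = (s : Int) := by
    rw [hsZ, Int.mul_ediv_cancel_left _ (by norm_num)]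
  have hrm : r + 1 ≤ m := by exact_mod_cast h2
  have hlen : t + 2 * (r + 1) + 1 ≤ point.length := by
    rw [hsdiv] at hpre
    have hlen' : s + m + 1 ≤ point.length := by exact_mod_cast hpre
    nlinarith [ht, hs, hrm]
  rw [hbase, show ((r : Int) + 1) = ((r + 1 : Nat) : Int) by push_cast; ring]
  rw [zipRow_eq_indexed point t (r + 1) hlen]
  unfold pvRow
  have hrange : PySem.List.pyRange 0 ((r + 1 : Nat) : Int) 1 =
      (List.range (r + 1)).map (fun k : Nat => (k : Int)) := by
    rw [PySem.List.pyRange_one]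
    simp
  rw [hrange, List.map_map]
  apply List.map_congr_left
  intro k _
  simp only [Function.comp]
  have b1 : (((r + 1 : Nat) : Int) - 1) * ((r + 1 : Nat) : Int) / 2 + (k : Int)
      = (t : Int) + (k : Int) := by
    rw [show (((r + 1 : Nat) : Int) - 1) * ((r + 1 : Nat) : Int)
        = ((r : Int) + 1 - 1) * ((r : Int) + 1) by push_cast; ring]
    rw [hbase]
  have b2 : ((r + 1 : Nat) : Int) * (((r + 1 : Nat) : Int) + 1) / 2 + (k : Int)
      = (t : Int) + ((r + 1 : Nat) : Int) + (k : Int) := by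
    rw [show ((r + 1 : Nat) : Int) * (((r + 1 : Nat) : Int) + 1)
        = ((r : Int) + 1) * ((r : Int) + 1 + 1) by push_cast; ring]
    rw [hT]; push_cast; ring
  rw [b1, b2]

-- ===== VERDICT (by name: the statement is the Claim_ definition above) =====
theorem triangles_spec : Claim_equal_triangles := by
  intro n point _hdom hpre
  unfold Spec_triangles triangles triangles_alt
  by_cases hn : n < 1
  · simp [PySem.List.pyRange_one_eq_nil (by omega : n + 1 ≤ 1)]
  · obtain ⟨m, hm⟩ : ∃ m : Nat, n = (m : Int) := ⟨n.toNat, by omega⟩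
    have hpre' : (m : Int) * ((m : Int) + 1) / 2 + (m : Int) + 1 ≤ (point.length : Int) := by
      rcases hpre with h | h
      · omega
      · rw [hm] at h; exact h
    subst hm
    show ((PySem.List.pyRange 1 ((m : Int) + 1) 1).foldl
      (fun (st : List (List (List Int)) × Int × Int) nr =>
        let st2 := (PySem.List.pyRange 0 nr 1).foldl (pvStepA point) st
        (st2.1, st2.2.1, st2.2.2 + 1)) ([], 0, 1)).1 =
      ((PySem.List.pyRange 1 ((m : Int) + 1) 1).foldl (pvStepB point) ([], 0)).1
    rw [outer_fold_A, outer_fold_B]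
    simp only [List.flatMap]
    congr 1
    apply List.map_congr_left
    intro nr hnr
    have hmem := (PySem.List.mem_pyRange_one).mp hnr
    exact (row_eq point (m : Int) nr hpre' (by omega) (by omega)).symm
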